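-- pv_equiv track=rewrite | github.com/jirachikai/ReportParserV0.4 | InformationClean.py | __getBirdView
-- ===== SOURCE A (Python) =====
-- def __getBirdView(TableReport):
-- 	BirdView = {}
-- 	BirdView['Passed'] = 0
-- 	BirdView['Failed'] = 0
-- 	BirdView['Avoided'] = 0
-- 	BirdView['Total'] = 0
-- 	for test in TableReport:
-- 		if test['TestResult']!='Passed' and test['TestResult']!='Avoided':
-- 			BirdView['Failed'] +=1
-- 		else:
-- 			if test['TestResult']:
-- 				BirdView[test['TestResult']] +=1
-- 		BirdView['Total'] += 1
-- 	for i in BirdView: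
-- 		BirdView[i] = str(BirdView[i])
-- 	return BirdView
-- ===== SOURCE B (Python) =====
-- def __getBirdView(TableReport):
-- 	results = [test['TestResult'] for test in TableReport]
-- 	total = len(results)
-- 	passed = sum(1 for r in results if r == 'Passed')
-- 	avoided = sum(1 for r in results if r == 'Avoided')
-- 	failed = total - passed - avoided
-- 	return {'Passed': str(passed), 'Failed': str(failed),
-- 	        'Avoided': str(avoided), 'Total': str(total)}
-- ===== Notes on version B (the rewrite author's own statement) =====
-- stated objective: simpler
-- what changed: Replaces the branching accumulation into a mutated dict (plus a second pass stringifying it) by materializing the TestResult values once, counting passed/avoided directly, deriving failed = total - passed - avoided arithmetically, and building the result dict in one literal.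
import Mathlib
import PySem

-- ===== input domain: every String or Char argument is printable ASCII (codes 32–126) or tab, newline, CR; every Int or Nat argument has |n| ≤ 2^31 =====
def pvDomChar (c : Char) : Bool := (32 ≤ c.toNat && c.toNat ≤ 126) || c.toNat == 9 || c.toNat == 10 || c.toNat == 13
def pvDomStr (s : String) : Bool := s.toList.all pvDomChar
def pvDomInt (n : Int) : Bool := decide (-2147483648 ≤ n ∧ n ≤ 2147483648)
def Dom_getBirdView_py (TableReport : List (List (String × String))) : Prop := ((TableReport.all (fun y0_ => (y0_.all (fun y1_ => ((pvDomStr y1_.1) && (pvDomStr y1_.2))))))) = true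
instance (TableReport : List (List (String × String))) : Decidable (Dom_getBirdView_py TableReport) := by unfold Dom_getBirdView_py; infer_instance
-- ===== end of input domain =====

-- B replaces A's branching accumulation into a mutated dict (plus a stringifying second pass)
-- by counting 'Passed'/'Avoided' directly and deriving failed = total - passed - avoided (simpler).
-- ===== PORT A =====
-- one iteration of A's loop body (bv = BirdView, test = current row); a missing
-- 'TestResult' key is a Python KeyError, excluded by Pre_ (the port leaves bv unchanged there)
def getBirdView_py_step (bv : PySem.Dict String Int) (test : List (String × String)) :
    PySem.Dict String Int :=
  let bv :=
    match (PySem.Dict.mk test).get? "TestResult" with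
    | none => bv
    | some r =>
      if ¬(r = "Passed") ∧ ¬(r = "Avoided") then bv.modify "Failed" 0 (· + 1)
      else if r ≠ "" then bv.modify r 0 (· + 1) else bv
  bv.modify "Total" 0 (· + 1)

def getBirdView_py (TableReport : List (List (String × String))) : List (String × String) :=
  (TableReport.foldl getBirdView_py_step
      ((((PySem.Dict.empty.insert "Passed" 0).insert "Failed" 0).insert "Avoided" 0).insert
        "Total" 0)).items.map (fun p => (p.1, PySem.Int.toStr p.2))

-- ===== PORT B =====
def getBirdView_py_results (TableReport : List (List (String × String))) : List String :=
  TableReport.map (fun test => ((PySem.Dict.mk test).get? "TestResult").getD "")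

def getBirdView_py_alt (TableReport : List (List (String × String))) : List (String × String) :=
  [("Passed", PySem.Int.toStr ((getBirdView_py_results TableReport).filter (· == "Passed")).length),
   ("Failed", PySem.Int.toStr (((getBirdView_py_results TableReport).length : Int)
      - ((getBirdView_py_results TableReport).filter (· == "Passed")).length
      - ((getBirdView_py_results TableReport).filter (· == "Avoided")).length)),
   ("Avoided", PySem.Int.toStr ((getBirdView_py_results TableReport).filter (· == "Avoided")).length),
   ("Total", PySem.Int.toStr ((getBirdView_py_results TableReport).length : Int))]

-- ===== PRECONDITION & SPEC =====
-- Pre_ excludes rows without a 'TestResult' key, where A raises KeyError.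
def Pre_getBirdView_py (TableReport : List (List (String × String))) : Prop :=
  ∀ test ∈ TableReport, test.any (fun p => p.1 == "TestResult") = true
instance (TableReport : List (List (String × String))) : Decidable (Pre_getBirdView_py TableReport) := by unfold Pre_getBirdView_py; infer_instance
def pvWitness_getBirdView_py : (List (List (String × String))) :=
  [[("TestResult", "Passed")], [("TestResult", "Oops")], [("TestResult", "Avoided")]]

def Spec_getBirdView_py (TableReport : List (List (String × String))) (out : List (String × String)) : Prop := out = getBirdView_py_alt TableReport
instance (TableReport : List (List (String × String))) (out : List (String × String)) : Decidable (Spec_getBirdView_py TableReport out) := by unfold Spec_getBirdView_py; infer_instance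

-- ===== CLAIM (what is proved, stated in full; the proofs are below) =====
def Claim_equal_getBirdView_py : Prop := ∀ (TableReport : List (List (String × String))), Dom_getBirdView_py TableReport → Pre_getBirdView_py TableReport → Spec_getBirdView_py TableReport (getBirdView_py TableReport)

-- ===== LEMMAS AND PROOFS =====
-- result string of one row (the value B reads; under Pre_ the lookup never misses)
def pvRes (test : List (String × String)) : String :=
  ((PySem.Dict.mk test).get? "TestResult").getD ""

lemma pvRes_some {test : List (String × String)}
    (h : test.any (fun p => p.1 == "TestResult") = true) :
    (PySem.Dict.mk test).get? "TestResult" = some (pvRes test) := by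
  induction test with
  | nil => simp at h
  | cons hd tl ih =>
    simp only [List.any_cons, Bool.or_eq_true] at h
    rw [PySem.Dict.get?_mk_cons, pvRes, PySem.Dict.get?_mk_cons]
    by_cases hk : hd.1 == "TestResult"
    · simp [hk]
    · have h' : (tl.any fun p => p.1 == "TestResult") = true := by
        rcases h with h | h
        · exact absurd h (by simp [hk])
        · exact h
      simp only [hk, Bool.false_eq_true, if_false]
      exact ih h'


-- the fold over any prefix, with the four counters generalized
lemma birdview_loop (L : List (List (String × String)))
    (h : ∀ test ∈ L, test.any (fun p => p.1 == "TestResult") = true)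
    (p f a t : Int) :
    L.foldl getBirdView_py_step
      (PySem.Dict.mk [("Passed", p), ("Failed", f), ("Avoided", a), ("Total", t)]) =
    PySem.Dict.mk
      [("Passed", p + ((L.map pvRes).filter (· == "Passed")).length),
       ("Failed", f + ((L.map pvRes).filter
          (fun r => !(r == "Passed") && !(r == "Avoided"))).length),
       ("Avoided", a + ((L.map pvRes).filter (· == "Avoided")).length),
       ("Total", t + L.length)] := by
  induction L generalizing p f a t with
  | nil => simp
  | cons hd tl ih =>
    have hhd := h hd (by simp)
    have htl : ∀ test ∈ tl, test.any (fun p => p.1 == "TestResult") = true :=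
      fun test ht => h test (by simp [ht])
    simp only [List.foldl_cons]
    rw [show getBirdView_py_step
          (PySem.Dict.mk [("Passed", p), ("Failed", f), ("Avoided", a), ("Total", t)]) hd =
        if pvRes hd = "Passed" then
          PySem.Dict.mk [("Passed", p + 1), ("Failed", f), ("Avoided", a), ("Total", t + 1)]
        else if pvRes hd = "Avoided" then
          PySem.Dict.mk [("Passed", p), ("Failed", f), ("Avoided", a + 1), ("Total", t + 1)]
        else
          PySem.Dict.mk [("Passed", p), ("Failed", f + 1), ("Avoided", a), ("Total", t + 1)]
        from ?_]
    · by_cases hP : pvRes hd = "Passed"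
      · rw [if_pos hP, ih htl]
        simp [hP]
        omega
      · rw [if_neg hP]
        by_cases hA : pvRes hd = "Avoided"
        · rw [if_pos hA, ih htl]
          simp [hA, hP]
          constructor <;> omega
        · rw [if_neg hA, ih htl]
          simp [hA, hP]
          constructor <;> omega
    · unfold getBirdView_py_step
      rw [pvRes_some hhd]
      by_cases hP : pvRes hd = "Passed"
      · simp only [hP]
        rfl
      · by_cases hA : pvRes hd = "Avoided"
        · simp only [hA]
          norm_num
          rfl
        · have hcond : ¬(pvRes hd = "Passed") ∧ ¬(pvRes hd = "Avoided") := ⟨hP, hA⟩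
          simp only [if_pos hcond, if_neg hP, if_neg hA]
          rfl

-- failed = total - passed - avoided, over the list of result strings
lemma failed_arith (rs : List String) :
    ((rs.filter (fun r => !(r == "Passed") && !(r == "Avoided"))).length : Int) =
      (rs.length : Int) - (rs.filter (· == "Passed")).length
        - (rs.filter (· == "Avoided")).length := by
  induction rs with
  | nil => simp
  | cons hd tl ih =>
    by_cases hP : hd = "Passed"
    · simp [hP]
      omega
    · by_cases hA : hd = "Avoided"
      · simp [hA, hP]
        omega
      · simp [hP, hA]
        omega

-- ===== VERDICT (by name: the statement is the Claim_ definition above) =====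
theorem getBirdView_py_spec : Claim_equal_getBirdView_py := by
  intro L _ hpre
  unfold Spec_getBirdView_py getBirdView_py getBirdView_py_alt
  have h0 : ((((PySem.Dict.empty.insert "Passed" (0:Int)).insert "Failed" 0).insert "Avoided" 0).insert "Total" 0) =
      PySem.Dict.mk [("Passed", 0), ("Failed", 0), ("Avoided", 0), ("Total", 0)] := by decide
  rw [h0, birdview_loop L hpre]
  have hres : L.map pvRes = getBirdView_py_results L := rfl
  simp only [List.map_cons, List.map_nil, hres, zero_add]
  rw [failed_arith (getBirdView_py_results L)]
  simp [getBirdView_py_results]
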